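-- pv_equiv track=rewrite | github.com/jkergosi/workflow-ops | n8n-ops-backend/app/services/workflow_analysis_service.py | infer_purpose
-- ===== SOURCE A (Python) =====
-- from typing import Dict, Any, List, Optional
--
-- def infer_purpose(nodes: List[Dict[str, Any]]) -> str:
--     """Infer the purpose of a workflow from its nodes"""
--     types = [node.get('type', '').lower() for node in nodes]
--
--     if any('webhook' in t for t in types):
--         if any('slack' in t or 'discord' in t for t in types):
--             return 'Webhook-triggered workflow that sends notifications'
--         return 'Webhook-triggered automation workflow'
--
--     if any('schedule' in t or 'cron' in t for t in types):
--         return 'Scheduled automation that runs on a regular interval'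
--
--     if any('openai' in t or 'anthropic' in t for t in types):
--         return 'AI-powered workflow using language models'
--
--     if any('postgres' in t or 'mysql' in t for t in types):
--         return 'Database-driven workflow for data processing'
--
--     return 'Automation workflow for data processing and integration'
-- ===== SOURCE B (Python) =====
-- def infer_purpose(nodes):
--     """Infer the purpose of a workflow from its nodes (single-pass flag scan)."""
--     has_webhook = has_notify = has_schedule = has_ai = has_db = False
--     for node in nodes:
--         t = node.get('type', '').lower()
--         has_webhook = has_webhook or 'webhook' in t
--         has_notify = has_notify or 'slack' in t or 'discord' in t
--         has_schedule = has_schedule or 'schedule' in t or 'cron' in t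
--         has_ai = has_ai or 'openai' in t or 'anthropic' in t
--         has_db = has_db or 'postgres' in t or 'mysql' in t
--     if has_webhook:
--         if has_notify:
--             return 'Webhook-triggered workflow that sends notifications'
--         return 'Webhook-triggered automation workflow'
--     if has_schedule:
--         return 'Scheduled automation that runs on a regular interval'
--     if has_ai:
--         return 'AI-powered workflow using language models'
--     if has_db:
--         return 'Database-driven workflow for data processing'
--     return 'Automation workflow for data processing and integration'
-- ===== Notes on version B (the rewrite author's own statement) =====
-- stated objective: alternative
-- what changed: Replaces the list comprehension plus five separate any() scans over the types list with one explicit pass over the nodes that accumulates five boolean flags (lowercasing each type once), followed by a branch purely on the flags.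
import Mathlib
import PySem

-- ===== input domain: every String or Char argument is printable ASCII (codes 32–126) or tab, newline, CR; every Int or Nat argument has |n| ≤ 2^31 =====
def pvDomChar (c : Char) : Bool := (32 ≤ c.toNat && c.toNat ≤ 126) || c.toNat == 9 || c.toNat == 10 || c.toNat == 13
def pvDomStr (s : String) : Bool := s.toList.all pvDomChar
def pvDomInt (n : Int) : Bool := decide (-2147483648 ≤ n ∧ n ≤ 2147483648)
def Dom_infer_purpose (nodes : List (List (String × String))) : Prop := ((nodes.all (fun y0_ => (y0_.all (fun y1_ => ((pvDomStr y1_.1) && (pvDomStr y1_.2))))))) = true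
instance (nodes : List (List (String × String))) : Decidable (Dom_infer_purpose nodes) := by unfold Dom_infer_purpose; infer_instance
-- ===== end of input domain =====

-- B replaces the comprehension + five any() scans with one pass accumulating five flags; same outputs.

-- ===== PORT A =====
-- node.get('type', '').lower()
def pvTypeOf (node : List (String × String)) : String :=
  PySem.Str.lower ((PySem.Dict.mk node).getD "type" "")

def infer_purpose (nodes : List (List (String × String))) : String :=
  let types := nodes.map pvTypeOf
  if types.any (fun t => PySem.Str.isIn "webhook" t) then
    if types.any (fun t => PySem.Str.isIn "slack" t || PySem.Str.isIn "discord" t) then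
      "Webhook-triggered workflow that sends notifications"
    else
      "Webhook-triggered automation workflow"
  else if types.any (fun t => PySem.Str.isIn "schedule" t || PySem.Str.isIn "cron" t) then
    "Scheduled automation that runs on a regular interval"
  else if types.any (fun t => PySem.Str.isIn "openai" t || PySem.Str.isIn "anthropic" t) then
    "AI-powered workflow using language models"
  else if types.any (fun t => PySem.Str.isIn "postgres" t || PySem.Str.isIn "mysql" t) then
    "Database-driven workflow for data processing"
  else
    "Automation workflow for data processing and integration"

-- ===== PORT B =====
-- one pass over the nodes building (has_webhook, has_notify, has_schedule, has_ai, has_db)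
def pvStep (f : Bool × Bool × Bool × Bool × Bool) (node : List (String × String)) :
    Bool × Bool × Bool × Bool × Bool :=
  let t := PySem.Str.lower ((PySem.Dict.mk node).getD "type" "")
  (f.1 || PySem.Str.isIn "webhook" t,
   f.2.1 || PySem.Str.isIn "slack" t || PySem.Str.isIn "discord" t,
   f.2.2.1 || PySem.Str.isIn "schedule" t || PySem.Str.isIn "cron" t,
   f.2.2.2.1 || PySem.Str.isIn "openai" t || PySem.Str.isIn "anthropic" t,
   f.2.2.2.2 || PySem.Str.isIn "postgres" t || PySem.Str.isIn "mysql" t)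

def infer_purpose_alt (nodes : List (List (String × String))) : String :=
  let f := nodes.foldl pvStep (false, false, false, false, false)
  if f.1 then
    if f.2.1 then "Webhook-triggered workflow that sends notifications"
    else "Webhook-triggered automation workflow"
  else if f.2.2.1 then "Scheduled automation that runs on a regular interval"
  else if f.2.2.2.1 then "AI-powered workflow using language models"
  else if f.2.2.2.2 then "Database-driven workflow for data processing"
  else "Automation workflow for data processing and integration"

-- ===== PRECONDITION & SPEC =====
def Spec_infer_purpose (nodes : List (List (String × String))) (out : String) : Prop := out = infer_purpose_alt nodes
instance (nodes : List (List (String × String))) (out : String) : Decidable (Spec_infer_purpose nodes out) := by unfold Spec_infer_purpose; infer_instance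

-- ===== CLAIM (what is proved, stated in full; the proofs are below) =====
def Claim_equal_infer_purpose : Prop := ∀ (nodes : List (List (String × String))), Dom_infer_purpose nodes → Spec_infer_purpose nodes (infer_purpose nodes)

-- ===== LEMMAS AND PROOFS =====

-- the single-pass fold computes exactly the five any() scans of A
lemma pvFoldl_flags (nodes : List (List (String × String))) (f : Bool × Bool × Bool × Bool × Bool) :
    nodes.foldl pvStep f =
      (f.1 || (nodes.map pvTypeOf).any (fun t => PySem.Str.isIn "webhook" t),
       f.2.1 || (nodes.map pvTypeOf).any (fun t => PySem.Str.isIn "slack" t || PySem.Str.isIn "discord" t),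
       f.2.2.1 || (nodes.map pvTypeOf).any (fun t => PySem.Str.isIn "schedule" t || PySem.Str.isIn "cron" t),
       f.2.2.2.1 || (nodes.map pvTypeOf).any (fun t => PySem.Str.isIn "openai" t || PySem.Str.isIn "anthropic" t),
       f.2.2.2.2 || (nodes.map pvTypeOf).any (fun t => PySem.Str.isIn "postgres" t || PySem.Str.isIn "mysql" t)) := by
  induction nodes generalizing f with
  | nil => simp
  | cons n ns ih =>
    simp only [List.foldl_cons, ih, List.map_cons, List.any_cons, pvStep, pvTypeOf]
    simp [Bool.or_assoc]

theorem infer_purpose_spec : Claim_equal_infer_purpose := by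
  intro nodes _
  unfold Spec_infer_purpose infer_purpose infer_purpose_alt
  rw [pvFoldl_flags]
  simp
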